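-- pv_equiv track=rewrite | github.com/abicknell2/engine-gpx | Engine/pavement.py | group_mypy_errors
-- ===== SOURCE A (Python) =====
-- from collections import defaultdict
--
-- def group_mypy_errors(errors: list[str]) -> dict[str, list[str]]:
--     """
--     Groups mypy errors by file and sorts them by line number.
--
--     Returns:
--         A dictionary where keys are file paths and values are lists of sorted error messages.
--     """
--     error_dict = defaultdict(list)
--
--     for error in errors:
--         parts = error.split(":", 3)  # Expected format: filename:line:column: error message
--         if len(parts) >= 3 and parts[1].isdigit():
--             file_path = parts[0]
--             error_dict[file_path].append(error.strip())
--
--     # Sort errors within each file by line number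
--     for file_path in error_dict:
--         error_dict[file_path].sort(key=lambda x: int(x.split(":")[1]))
--
--     return error_dict
-- ===== SOURCE B (Python) =====
-- from collections import defaultdict
--
--
-- def _insert_by_line(bucket, msg):
--     """Return bucket (kept sorted by line number) with msg inserted after equal lines."""
--     line = int(msg.split(":")[1])
--     for i, cur in enumerate(bucket):
--         if int(cur.split(":")[1]) > line:
--             return bucket[:i] + [msg] + bucket[i:]
--     return bucket + [msg]
--
--
-- def group_mypy_errors(errors):
--     """Group mypy errors by file, keeping each file's bucket sorted by line number
--     as it is built (online insertion instead of a batch sort afterwards)."""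
--     error_dict = defaultdict(list)
--     for error in errors:
--         parts = error.split(":", 3)
--         if len(parts) >= 3 and parts[1].isdigit():
--             error_dict[parts[0]] = _insert_by_line(error_dict[parts[0]], error.strip())
--     return error_dict
-- ===== Notes on version B (the rewrite author's own statement) =====
-- stated objective: alternative
-- what changed: B keeps each file's bucket sorted as it goes, inserting every stripped error at its line-number position in one pass, instead of A's append-then-batch-sort-every-bucket second loop.
import Mathlib
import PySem

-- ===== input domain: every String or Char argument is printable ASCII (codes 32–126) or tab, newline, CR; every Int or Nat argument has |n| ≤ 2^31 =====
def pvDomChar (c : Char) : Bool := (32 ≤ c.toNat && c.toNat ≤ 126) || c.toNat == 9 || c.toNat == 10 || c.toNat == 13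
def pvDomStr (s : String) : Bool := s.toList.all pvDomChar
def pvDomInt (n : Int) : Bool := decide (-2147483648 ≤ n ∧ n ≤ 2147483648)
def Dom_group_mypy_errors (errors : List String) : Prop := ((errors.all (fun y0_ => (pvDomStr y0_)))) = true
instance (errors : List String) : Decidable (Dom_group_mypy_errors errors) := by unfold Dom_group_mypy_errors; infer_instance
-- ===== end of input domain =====

-- B builds each file's bucket already sorted by inserting every message at its place
-- (online insertion) instead of appending and batch-sorting each bucket afterwards;
-- objective: alternative decomposition (one pass, no second sorting loop), same cost class.

-- shared helper: the Python expression int(x.split(":")[1]), used by A's sort key and by B's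
-- insertion. On every message both programs reach it on (a stripped error whose unstripped
-- form had ≥ 3 ':'-fields and an all-digit second field) split? returns some and the second
-- field is a nonempty digit string, so int() never raises; the .getD defaults are never taken there.
def pvKey (x : String) : Int :=
  (PySem.Int.ofStr? (((PySem.Str.split? x ":").getD []).getD 1 "")).getD 0

-- ===== PORT A =====
-- literal port of A: fold appending each accepted stripped error to its file's bucket
-- (defaultdict(list)), then a second pass sorting every bucket by line number.
def group_mypy_errors (errors : List String) : List (String × List String) :=
  let raw : PySem.Dict String (List String) :=
    errors.foldl (fun d error =>
      let parts := (PySem.Str.splitMax? error ":" 3).getD []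
      if 3 ≤ parts.length ∧ PySem.Str.strIsdigit (parts.getD 1 "") = true then
        d.insert (parts.getD 0 "") ((d.getD (parts.getD 0 "") []) ++ [PySem.Str.strip error])
      else d) PySem.Dict.empty
  -- for file_path in error_dict: error_dict[file_path].sort(key=lambda x: int(x.split(":")[1]))
  (PySem.Dict.mk (raw.items.map (fun kv => (kv.1, PySem.List.sorted kv.2 pvKey false)))).items

-- ===== PORT B =====
-- port of Source B's _insert_by_line: walk the bucket and place msg before the first
-- strictly larger line number (so after equal lines).
def insLine (line : Int) (msg : String) : List String → List String
  | [] => [msg]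
  | cur :: rest => if line < pvKey cur then msg :: cur :: rest else cur :: insLine line msg rest

def group_mypy_errors_alt (errors : List String) : List (String × List String) :=
  (errors.foldl (fun d error =>
    let parts := (PySem.Str.splitMax? error ":" 3).getD []
    if 3 ≤ parts.length ∧ PySem.Str.strIsdigit (parts.getD 1 "") = true then
      let msg := PySem.Str.strip error
      d.insert (parts.getD 0 "") (insLine (pvKey msg) msg (d.getD (parts.getD 0 "") []))
    else d) (PySem.Dict.empty : PySem.Dict String (List String))).items

-- ===== PRECONDITION & SPEC =====
def Spec_group_mypy_errors (errors : List String) (out : List (String × List String)) : Prop := out = group_mypy_errors_alt errors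
instance (errors : List String) (out : List (String × List String)) : Decidable (Spec_group_mypy_errors errors out) := by unfold Spec_group_mypy_errors; infer_instance

-- ===== CLAIM (what is proved, stated in full; the proofs are below) =====
def Claim_equal_group_mypy_errors : Prop := ∀ (errors : List String), Dom_group_mypy_errors errors → Spec_group_mypy_errors errors (group_mypy_errors errors)

-- ===== LEMMAS AND PROOFS =====

-- "apply sorted-with-key-pvKey to every bucket of a dict"
def svDict (d : PySem.Dict String (List String)) : PySem.Dict String (List String) :=
  PySem.Dict.mk (d.items.map (fun kv => (kv.1, PySem.List.sorted kv.2 pvKey false)))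

theorem insLine_eq_insertBy (msg : String) (l : List String) :
    insLine (pvKey msg) msg l = PySem.List.insertBy (fun a b => decide (pvKey a < pvKey b)) msg l := by
  induction l with
  | nil => rfl
  | cons y ys ih => simp [insLine, PySem.List.insertBy, ih]

theorem sorted_append_singleton (v : List String) (m : String) :
    PySem.List.sorted (v ++ [m]) pvKey false
      = PySem.List.insertBy (fun a b => decide (pvKey a < pvKey b)) m (PySem.List.sorted v pvKey false) := by
  rw [PySem.List.sorted_eq_foldl_insertBy, PySem.List.sorted_eq_foldl_insertBy, List.foldl_append]
  rfl

theorem contains_svDict (d : PySem.Dict String (List String)) (k : String) :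
    (svDict d).contains k = d.contains k := by
  simp only [svDict, PySem.Dict.contains, List.any_map]
  congr 1

theorem get?_svDict (d : PySem.Dict String (List String)) (k : String) :
    (svDict d).get? k = (d.get? k).map (fun v => PySem.List.sorted v pvKey false) := by
  simp only [svDict, PySem.Dict.get?, List.find?_map]
  have hpred : ((fun (p : String × List String) => p.1 == k) ∘
      fun kv => (kv.1, PySem.List.sorted kv.2 pvKey false))
      = (fun (p : String × List String) => p.1 == k) := funext fun p => rfl
  rw [hpred]
  cases d.items.find? (fun p => p.1 == k) <;> rfl

theorem getD_svDict (d : PySem.Dict String (List String)) (k : String) :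
    (svDict d).getD k [] = PySem.List.sorted (d.getD k []) pvKey false := by
  simp only [PySem.Dict.getD, get?_svDict]
  cases d.get? k <;> rfl

theorem insert_svDict (d : PySem.Dict String (List String)) (k : String) (v : List String) :
    (svDict d).insert k (PySem.List.sorted v pvKey false) = svDict (d.insert k v) := by
  simp only [PySem.Dict.insert, contains_svDict]
  by_cases h : d.contains k = true
  · simp only [h, if_true, svDict]
    congr 1
    simp only [List.map_map]
    apply List.map_congr_left
    intro p _
    by_cases hp : p.1 = k <;> simp [hp]
  · simp [h, svDict]

theorem fold_inv (errors : List String) (d : PySem.Dict String (List String)) :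
    errors.foldl (fun d error =>
        let parts := (PySem.Str.splitMax? error ":" 3).getD []
        if 3 ≤ parts.length ∧ PySem.Str.strIsdigit (parts.getD 1 "") = true then
          let msg := PySem.Str.strip error
          d.insert (parts.getD 0 "") (insLine (pvKey msg) msg (d.getD (parts.getD 0 "") []))
        else d) (svDict d)
      = svDict (errors.foldl (fun d error =>
          let parts := (PySem.Str.splitMax? error ":" 3).getD []
          if 3 ≤ parts.length ∧ PySem.Str.strIsdigit (parts.getD 1 "") = true then
            d.insert (parts.getD 0 "") ((d.getD (parts.getD 0 "") []) ++ [PySem.Str.strip error])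
          else d) d) := by
  induction errors generalizing d with
  | nil => rfl
  | cons e rest ih =>
    simp only [List.foldl_cons]
    by_cases h : 3 ≤ ((PySem.Str.splitMax? e ":" 3).getD []).length ∧
        PySem.Str.strIsdigit (((PySem.Str.splitMax? e ":" 3).getD []).getD 1 "") = true
    · simp only [h]
      rw [getD_svDict, insLine_eq_insertBy, ← sorted_append_singleton, insert_svDict]
      exact ih _
    · simp only [h, if_false]
      exact ih d

-- ===== VERDICT (by name: the statement is the Claim_ definition above) =====
theorem group_mypy_errors_spec : Claim_equal_group_mypy_errors := by
  intro errors _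
  show _ = group_mypy_errors_alt errors
  unfold group_mypy_errors group_mypy_errors_alt
  have h := fold_inv errors PySem.Dict.empty
  have he : svDict PySem.Dict.empty = PySem.Dict.empty := rfl
  rw [he] at h
  rw [h]
  rfl
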